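-- pv_equiv track=rewrite | github.com/muknta/math-expression-to-words | main.py | math_to_str
-- ===== SOURCE A (Python) =====
-- from string import digits
--
-- _digits = ['zero', 'one', 'two', 'three', 'four', 'five', 'six', 'seven', 'eight', 'nine']
--
-- _from_ten_to_twenty = ['ten', 'eleven', 'twelve', 'thirteen', 'fourteen', 'fifteen', 'sixteen', 'seventeen', 'eighteen', 'nineteen']
--
-- _hundredths = ['twenty', 'thirty', 'forty', 'fifty', 'sixty', 'seventy', 'eighty', 'ninety']
--
-- _num_orders = ['thousand', 'million', 'billion', 'trillion', 'quadrillion', 'quintillion', 'sextillion', 'septillion', 'octillion', 'nonillion', 'decillion']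
--
-- _symb_to_word = {"+":"plus", "-":"minus", "=":"equals", "/":"divide", "%":"percent", "*":"multiplicate", "(":"left bracket", ")":"right bracket", "^":"raise to the power of"}
--
-- def is_valid(exp: str) -> bool:
--     '''Checks validity of a full math expression'''
--     return (set(exp).issubset(f"{digits} {''.join(_symb_to_word.keys())}") and
--             all(elem.isdigit() or not set(elem).intersection(f"{digits}") for elem in exp.split()))
--
-- def concat_order(ord_num: int, order: str) -> str:
--     """Converts order of a number to words
--     (12_345_678 -- orders between underscores)
--
--     Params:
--     ord_num (int): position of order in the number
--                    (e.g. '345' in '12345678' - position of thousands -- ord_num=1 in _num_orders)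
--     order (str): 1|2|3 digit|s -- order of the number -- part of the string
--                  (e.g. '12' or '345' or '678' in '12345678')
--
--     Returns:
--     str: order of the number in words
--          (e.g. '12' in '12345678' -- 'twelve million, ',
--                '678' -- 'six hundred and seventy-eight')
--
--     """
--     res = ''
--     ord_len = len(order)
--     if ord_len == 1:
--         res += _digits[int(order[0])]
--     elif ord_len == 2 or ord_len == 3:
--         if ord_len == 3 and order[0] != '0':
--             res += f'{_digits[int(order[0])]} hundred'
--             if order[1] != '0' or order[2] != '0':
--                res += ' and '
--         if order[-2] == '1':
--             res += _from_ten_to_twenty[int(order[-1])]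
--         elif order[-2] == '0' and order[-1] != '0':
--             res += _digits[int(order[-1])]
--         elif order[-2] not in '01':
--             res += _hundredths[int(order[-2])-2]
--             if order[-1] != '0':
--                 res += f'-{_digits[int(order[-1])]}'
--     if ord_num and set(order) != {'0'}:
--         res += f' {_num_orders[ord_num-1]}'
--     return res
--
-- def orders_split(num: str) -> list:
--     """Converts number to order list
--
--     Example:
--     num='12345678' --> return ['12','345','678']
--
--     """
--     l = [num[i-3:i] for i in range(len(num),0,-3)]
--     if len(num)%3:
--         l[-1] = num[:len(num)%3]
--     return l
--
-- def math_to_str(expression: str) -> str: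
--     '''Converts math expression to words'''
--     if not is_valid(expression):
--         return "invalid input"
--     res = ''
--     for elem in expression.split():
--         if res:
--             res += ' '
--         if elem.isdigit():
--             ord_elem = orders_split(elem.lstrip("0"))
--             res_dig_elem = '' if ord_elem else 'zero'
--             for num,el in enumerate(ord_elem):
--                 c_o = concat_order(num,el)
--                 if c_o:
--                     res_dig_elem = f'{c_o}, {res_dig_elem}' if num and res_dig_elem else c_o + res_dig_elem
--             res += res_dig_elem
--         else:
--             res += _symb_to_word[elem]
--     return res
-- ===== SOURCE B (Python) =====
-- _digits = ['zero', 'one', 'two', 'three', 'four', 'five', 'six', 'seven', 'eight', 'nine']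
-- _from_ten_to_twenty = ['ten', 'eleven', 'twelve', 'thirteen', 'fourteen', 'fifteen', 'sixteen', 'seventeen', 'eighteen', 'nineteen']
-- _hundredths = ['twenty', 'thirty', 'forty', 'fifty', 'sixty', 'seventy', 'eighty', 'ninety']
-- _num_orders = ['thousand', 'million', 'billion', 'trillion', 'quadrillion', 'quintillion', 'sextillion', 'septillion', 'octillion', 'nonillion', 'decillion']
-- _symb_to_word = {"+": "plus", "-": "minus", "=": "equals", "/": "divide", "%": "percent",
--                  "*": "multiplicate", "(": "left bracket", ")": "right bracket",
--                  "^": "raise to the power of"}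
--
-- def _group_value(g):
--     """Numeric value of a short digit string (no int() round-trip)."""
--     n = 0
--     for ch in g:
--         n = 10 * n + (ord(ch) - 48)
--     return n
--
-- def _group_words(n):
--     """English words for a group value 1 <= n <= 999, by arithmetic on the value."""
--     res = ''
--     h, r = divmod(n, 100)
--     if h:
--         res = _digits[h] + ' hundred'
--         if r:
--             res += ' and '
--     if 10 <= r < 20:
--         res += _from_ten_to_twenty[r - 10]
--     elif 0 < r < 10:
--         res += _digits[r]
--     elif r >= 20:
--         res += _hundredths[r // 10 - 2]
--         if r % 10:
--             res += '-' + _digits[r % 10]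
--     return res
--
-- def _number_words(tok):
--     """Words for a digit token: forward 3-digit groups, non-empty chunks joined."""
--     s = tok.lstrip('0')
--     if not s:
--         return 'zero'
--     head = len(s) % 3 or 3
--     groups = [s[:head]] + [s[i:i + 3] for i in range(head, len(s), 3)]
--     k = len(groups)
--     chunks = []
--     for i, g in enumerate(groups):
--         v = _group_value(g)
--         if v == 0:
--             continue
--         w = _group_words(v)
--         mag = k - 1 - i
--         if mag:
--             w += ' ' + _num_orders[mag - 1]
--         chunks.append(w)
--     return ', '.join(chunks)
--
-- def math_to_str(expression: str) -> str:
--     '''Converts math expression to words'''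
--     toks = expression.split()
--     ok = set(expression) <= set("0123456789 +-=/%*()^") and \
--         all(t.isdigit() or not (set(t) & set("0123456789")) for t in toks)
--     if not ok:
--         return "invalid input"
--     return ' '.join(_number_words(t) if t.isdigit() else _symb_to_word[t]
--                     for t in toks)
-- ===== Notes on version B (the rewrite author's own statement) =====
-- stated objective: simpler
-- what changed: B converts each digit token by splitting it into 3-digit groups most-significant-first, computing every group's numeric value and deriving the words arithmetically (divmod), then joining the non-empty chunks with ', ' and the token words with ' ', instead of A's backward slicing, per-character branching and reversed prepend accumulation.
import Mathlib
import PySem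

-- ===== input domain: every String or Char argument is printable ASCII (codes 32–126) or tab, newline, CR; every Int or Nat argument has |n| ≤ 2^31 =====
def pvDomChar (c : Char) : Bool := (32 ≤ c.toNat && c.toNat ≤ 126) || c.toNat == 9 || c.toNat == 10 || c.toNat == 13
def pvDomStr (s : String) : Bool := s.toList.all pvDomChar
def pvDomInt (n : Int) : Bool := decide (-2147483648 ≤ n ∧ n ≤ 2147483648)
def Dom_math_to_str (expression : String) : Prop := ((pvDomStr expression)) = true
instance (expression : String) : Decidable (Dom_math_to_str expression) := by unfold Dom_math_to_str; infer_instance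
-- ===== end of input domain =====

-- B re-derives each 3-digit group's words from its numeric value and joins the non-empty
-- chunks most-significant-first, instead of A's reversed prepend accumulation (objective: simpler).

-- shared module-level tables (identical constants in both Pythons)
def pvDigits : List (List Char) :=
  ["zero".toList, "one".toList, "two".toList, "three".toList, "four".toList,
   "five".toList, "six".toList, "seven".toList, "eight".toList, "nine".toList]
def pvTeens : List (List Char) :=
  ["ten".toList, "eleven".toList, "twelve".toList, "thirteen".toList, "fourteen".toList,
   "fifteen".toList, "sixteen".toList, "seventeen".toList, "eighteen".toList, "nineteen".toList]
def pvTens : List (List Char) :=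
  ["twenty".toList, "thirty".toList, "forty".toList, "fifty".toList, "sixty".toList,
   "seventy".toList, "eighty".toList, "ninety".toList]
def pvOrders : List (List Char) :=
  ["thousand".toList, "million".toList, "billion".toList, "trillion".toList, "quadrillion".toList,
   "quintillion".toList, "sextillion".toList, "septillion".toList, "octillion".toList,
   "nonillion".toList, "decillion".toList]
def pvSymb : PySem.Dict (List Char) (List Char) :=
  PySem.Dict.ofList
    [("+".toList, "plus".toList), ("-".toList, "minus".toList), ("=".toList, "equals".toList),
     ("/".toList, "divide".toList), ("%".toList, "percent".toList),
     ("*".toList, "multiplicate".toList), ("(".toList, "left bracket".toList),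
     (")".toList, "right bracket".toList), ("^".toList, "raise to the power of".toList)]
-- f"{digits} {''.join(_symb_to_word.keys())}" spelled out (the keys joined in insertion order)
def pvAllowed : List Char := "0123456789 +-=/%*()^".toList

-- ===== PORT A =====
-- int(c) for the single digit characters this program feeds it — exact there
def pvDigitInt (c : Char) : Int := (c.toNat : Int) - 48

def pvIsValid (exp : List Char) : Bool :=
  PySem.Set.issubset (PySem.Set.ofList exp) (PySem.Set.ofList pvAllowed) &&
  (PySem.Chars.split₀ exp).all (fun elem =>
    PySem.Chars.strIsdigit elem ||
      decide (PySem.Set.inter (PySem.Set.ofList elem) (PySem.Set.ofList "0123456789".toList) = []))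

def pvConcatOrder (ordNum : Int) (order : List Char) : List Char :=
  let ordLen := order.length
  let res : List Char :=
    if ordLen = 1 then
      PySem.List.pyGetD pvDigits (pvDigitInt (PySem.List.pyGetD order 0 '0')) []
    else if ordLen = 2 ∨ ordLen = 3 then
      let res :=
        if ordLen = 3 ∧ PySem.List.pyGetD order 0 '0' ≠ '0' then
          (PySem.List.pyGetD pvDigits (pvDigitInt (PySem.List.pyGetD order 0 '0')) [])
            ++ " hundred".toList
            ++ (if PySem.List.pyGetD order 1 '0' ≠ '0' ∨ PySem.List.pyGetD order 2 '0' ≠ '0'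
                then " and ".toList else [])
        else []
      let c2 := PySem.List.pyGetD order (-2) '0'
      let c1 := PySem.List.pyGetD order (-1) '0'
      res ++
        (if c2 = '1' then PySem.List.pyGetD pvTeens (pvDigitInt c1) []
         else if c2 = '0' ∧ c1 ≠ '0' then PySem.List.pyGetD pvDigits (pvDigitInt c1) []
         else if ¬(c2 = '0' ∨ c2 = '1') then  -- `order[-2] not in '01'`: single-char membership
           PySem.List.pyGetD pvTens (pvDigitInt c2 - 2) []
             ++ (if c1 ≠ '0' then '-' :: PySem.List.pyGetD pvDigits (pvDigitInt c1) [] else [])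
         else [])
    else []
  res ++ (if ordNum ≠ 0 ∧ ¬(PySem.Set.equal (PySem.Set.ofList order) (PySem.Set.ofList ['0']) = true)
          then ' ' :: PySem.List.pyGetD pvOrders (ordNum - 1) [] else [])

def pvOrdersSplit (num : List Char) : List (List Char) :=
  let n : Int := PySem.List.len num
  let l := (PySem.List.pyRange n 0 (-3)).map (fun i => PySem.List.slice num (some (i - 3)) (some i))
  if PySem.Int.mod n 3 ≠ 0 then
    PySem.List.pySetD l (-1) (PySem.List.slice num none (some (PySem.Int.mod n 3)))
  else l

-- the body of A's `for elem in expression.split()` loop past the separator step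
def pvTokenWordA (elem : List Char) : List Char :=
  if PySem.Chars.strIsdigit elem then
    let ordElem := pvOrdersSplit (elem.dropWhile (· == '0'))  -- elem.lstrip("0")
    let init := if ordElem.isEmpty then "zero".toList else []
    ordElem.zipIdx.foldl (fun rd p =>
      let co := pvConcatOrder (p.2 : Int) p.1
      if co ≠ [] then
        (if (p.2 : Int) ≠ 0 ∧ rd ≠ [] then co ++ ", ".toList ++ rd else co ++ rd)
      else rd) init
  else (PySem.Dict.get? pvSymb elem).getD []  -- KeyError is excluded by Pre_

def math_to_str (expression : String) : String :=
  if pvIsValid expression.toList then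
    String.ofList ((PySem.Chars.split₀ expression.toList).foldl
      (fun res elem => (if res ≠ [] then res ++ [' '] else res) ++ pvTokenWordA elem) [])
  else "invalid input"

-- ===== PORT B =====
def pvGroupVal (g : List Char) : Int :=
  g.foldl (fun n c => 10 * n + ((c.toNat : Int) - 48)) 0  -- ord(ch) - 48

def pvGroupWords (n : Int) : List Char :=
  let h := PySem.Int.floordiv n 100
  let r := PySem.Int.mod n 100
  let res : List Char :=
    if h ≠ 0 then
      PySem.List.pyGetD pvDigits h [] ++ " hundred".toList
        ++ (if r ≠ 0 then " and ".toList else [])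
    else []
  res ++
    (if 10 ≤ r ∧ r < 20 then PySem.List.pyGetD pvTeens (r - 10) []
     else if 0 < r ∧ r < 10 then PySem.List.pyGetD pvDigits r []
     else if 20 ≤ r then
       PySem.List.pyGetD pvTens (PySem.Int.floordiv r 10 - 2) []
         ++ (if PySem.Int.mod r 10 ≠ 0 then '-' :: PySem.List.pyGetD pvDigits (PySem.Int.mod r 10) [] else [])
     else [])

def pvNumberWords (tok : List Char) : List Char :=
  let s := tok.dropWhile (· == '0')  -- tok.lstrip('0')
  if s.isEmpty then "zero".toList
  else
    let n : Int := PySem.List.len s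
    let head : Int := if PySem.Int.mod n 3 ≠ 0 then PySem.Int.mod n 3 else 3  -- len(s) % 3 or 3
    let groups := PySem.List.slice s none (some head) ::
      (PySem.List.pyRange head n 3).map (fun i => PySem.List.slice s (some i) (some (i + 3)))
    let k := groups.length
    let chunks := groups.zipIdx.foldl (fun ch p =>
      let v := pvGroupVal p.1
      if v = 0 then ch
      else
        let w := pvGroupWords v
        let mag := k - 1 - p.2
        let w := if mag ≠ 0 then w ++ ' ' :: PySem.List.pyGetD pvOrders ((mag : Int) - 1) [] else w
        ch ++ [w]) []
    PySem.Chars.join ", ".toList chunks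

def math_to_str_alt (expression : String) : String :=
  let toks := PySem.Chars.split₀ expression.toList
  let ok := PySem.Set.issubset (PySem.Set.ofList expression.toList) (PySem.Set.ofList pvAllowed) &&
    toks.all (fun t =>
      PySem.Chars.strIsdigit t ||
        decide (PySem.Set.inter (PySem.Set.ofList t) (PySem.Set.ofList "0123456789".toList) = []))
  if ok then
    String.ofList (PySem.Chars.join [' ']
      (toks.map (fun t =>
        if PySem.Chars.strIsdigit t then pvNumberWords t
        else (PySem.Dict.get? pvSymb t).getD [])))  -- KeyError is excluded by Pre_
  else "invalid input"

-- ===== PRECONDITION & SPEC =====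
-- Pre_ excludes exactly the inputs where A raises: a VALID expression containing a non-digit
-- token that is not one of the nine operator keys (KeyError), or a digit token with more than
-- 36 significant digits (IndexError past 'decillion' in _num_orders). On every other input A
-- returns normally.
def Pre_math_to_str (expression : String) : Prop :=
  (expression.toList.all (fun c => pvAllowed.contains c)) = false ∨
  ((PySem.Chars.split₀ expression.toList).any (fun t =>
      !PySem.Chars.strIsdigit t && t.any (fun c => PySem.Chars.isdigit c))) = true ∨
  ((PySem.Chars.split₀ expression.toList).all (fun t =>
      (PySem.Chars.strIsdigit t && decide ((t.dropWhile (· == '0')).length ≤ 36)) ||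
      ["+".toList, "-".toList, "=".toList, "/".toList, "%".toList,
       "*".toList, "(".toList, ")".toList, "^".toList].contains t)) = true

instance (expression : String) : Decidable (Pre_math_to_str expression) := by
  unfold Pre_math_to_str; infer_instance

def pvWitness_math_to_str : String := "12000345 + 78 = 0"

def Spec_math_to_str (expression : String) (out : String) : Prop := out = math_to_str_alt expression
instance (expression : String) (out : String) : Decidable (Spec_math_to_str expression out) := by
  unfold Spec_math_to_str; infer_instance

-- ===== CLAIM (what is proved, stated in full; the proofs are below) =====
def Claim_equal_math_to_str : Prop :=
  ∀ (expression : String), Dom_math_to_str expression → Pre_math_to_str expression →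
    Spec_math_to_str expression (math_to_str expression)

-- ===== LEMMAS AND PROOFS =====


-- ---------- proof-side definitions ----------

-- a well-formed 3-digit group as produced from a digit token
def pvGood (g : List Char) : Prop :=
  g ≠ [] ∧ g.length ≤ 3 ∧ (∀ c ∈ g, PySem.Chars.isdigit c = true) ∧
    (g.length < 3 → g.head? ≠ some '0')

def pvSuffix (m : Nat) : List Char :=
  if m ≠ 0 then ' ' :: PySem.List.pyGetD pvOrders ((m : Int) - 1) [] else []

-- the non-empty chunks, most-significant group first
def pvChunks : List (List Char) → List (List Char)
  | [] => []
  | g :: rest =>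
    (if pvGroupVal g = 0 then [] else [pvGroupWords (pvGroupVal g) ++ pvSuffix rest.length])
      ++ pvChunks rest

-- canonical most-significant-first 3-digit grouping
def pvMS (s : List Char) (h q : Nat) : List (List Char) :=
  s.take h :: (List.range q).map (fun (j : Nat) => (s.drop (h + 3 * j)).take 3)

-- ---------- character facts ----------

theorem pvChar_eq_iff (c d : Char) : c = d ↔ c.toNat = d.toNat := by
  constructor
  · rintro rfl; rfl
  · intro h; apply Char.ext; rw [← UInt32.toNat_inj]; exact h

theorem pvIsdigit_toNat (c : Char) (h : PySem.Chars.isdigit c = true) :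
    48 ≤ c.toNat ∧ c.toNat ≤ 57 := by
  simp only [PySem.Chars.isdigit, Bool.and_eq_true, decide_eq_true_eq] at h
  obtain ⟨h1, h2⟩ := h
  rw [Char.le_def, UInt32.le_iff_toNat_le] at h1 h2
  exact ⟨h1, h2⟩

-- ---------- table facts ----------

theorem pvDigits_getD_ne (i : Int) (h0 : 0 ≤ i) (h9 : i ≤ 9) :
    PySem.List.pyGetD pvDigits i [] ≠ [] := by
  have hmem : PySem.List.pyGetD pvDigits i [] ∈ pvDigits :=
    PySem.List.pyGetD_mem pvDigits []
      (by simp [PySem.Raise.InRange, pvDigits]; omega)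
  have hne : ∀ x ∈ pvDigits, x ≠ [] := by decide
  exact hne _ hmem

theorem pvTeens_getD_ne (i : Int) (h0 : 0 ≤ i) (h9 : i ≤ 9) :
    PySem.List.pyGetD pvTeens i [] ≠ [] := by
  have hmem : PySem.List.pyGetD pvTeens i [] ∈ pvTeens :=
    PySem.List.pyGetD_mem pvTeens []
      (by simp [PySem.Raise.InRange, pvTeens]; omega)
  have hne : ∀ x ∈ pvTeens, x ≠ [] := by decide
  exact hne _ hmem

theorem pvTens_getD_ne (i : Int) (h0 : 0 ≤ i) (h9 : i ≤ 7) :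
    PySem.List.pyGetD pvTens i [] ≠ [] := by
  have hmem : PySem.List.pyGetD pvTens i [] ∈ pvTens :=
    PySem.List.pyGetD_mem pvTens []
      (by simp [PySem.Raise.InRange, pvTens]; omega)
  have hne : ∀ x ∈ pvTens, x ≠ [] := by decide
  exact hne _ hmem

-- ---------- outer loop: separator fold is a join over the token words ----------

theorem pvSepFlat (f : List Char → List Char) (ts : List (List Char)) (acc : List Char)
    (hacc : acc ≠ []) :
    ts.foldl (fun res t => (if res ≠ [] then res ++ [' '] else res) ++ f t) acc
      = acc ++ ts.flatMap (fun t => ' ' :: f t) := by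
  induction ts generalizing acc with
  | nil => simp
  | cons t rest ih =>
    simp only [List.foldl_cons, if_pos hacc]
    rw [ih _ (by simp)]
    simp [List.append_assoc]

theorem pvJoinFlat (sep : List Char) (x : List Char) (xs : List (List Char)) :
    PySem.Chars.join sep (x :: xs) = x ++ xs.flatMap (fun y => sep ++ y) := by
  induction xs generalizing x with
  | nil => simp [PySem.Chars.join_singleton]
  | cons y ys ih =>
    rw [PySem.Chars.join_cons_cons, ih y]
    simp [List.append_assoc]

theorem pvSepJoin (f : List Char → List Char) (ts : List (List Char))
    (hne : ∀ t ∈ ts, f t ≠ []) :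
    ts.foldl (fun res t => (if res ≠ [] then res ++ [' '] else res) ++ f t) []
      = PySem.Chars.join [' '] (ts.map f) := by
  cases ts with
  | nil => simp [PySem.Chars.join_nil]
  | cons t rest =>
    have hft : f t ≠ [] := hne t (by simp)
    simp only [List.foldl_cons, List.map_cons]
    rw [pvJoinFlat]
    have : (if ([] : List Char) ≠ [] then ([] : List Char) ++ [' '] else []) ++ f t = f t := by simp
    rw [this, pvSepFlat f rest (f t) hft, List.flatMap_map]
    rfl

-- ---------- set facts ----------

theorem pvSetEqual_zero_iff (g : List Char) (hne : g ≠ []) :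
    PySem.Set.equal (PySem.Set.ofList g) (PySem.Set.ofList ['0']) = true ↔ ∀ c ∈ g, c = '0' := by
  simp only [PySem.Set.equal, Bool.and_eq_true, PySem.Set.issubset_iff, PySem.Set.mem_ofList,
    List.mem_singleton]
  constructor
  · rintro ⟨h1, _⟩ c hc; exact h1 c hc
  · intro h
    refine ⟨h, ?_⟩
    intro x hx
    obtain ⟨c, hc⟩ := List.exists_mem_of_ne_nil g hne
    rw [hx, ← h c hc]; exact hc

-- ---------- group value and words ----------

theorem pvGroupVal_bounds (g : List Char) (hlen : g.length ≤ 3)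
    (hdig : ∀ c ∈ g, PySem.Chars.isdigit c = true) :
    0 ≤ pvGroupVal g ∧ pvGroupVal g ≤ 999 := by
  rcases g with _ | ⟨a, _ | ⟨b, _ | ⟨c, _ | ⟨d, tl⟩⟩⟩⟩
  · simp [pvGroupVal]
  · have ha := pvIsdigit_toNat a (hdig a (by simp))
    simp only [pvGroupVal, List.foldl_cons, List.foldl_nil]
    omega
  · have ha := pvIsdigit_toNat a (hdig a (by simp))
    have hb := pvIsdigit_toNat b (hdig b (by simp))
    simp only [pvGroupVal, List.foldl_cons, List.foldl_nil]
    omega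
  · have ha := pvIsdigit_toNat a (hdig a (by simp))
    have hb := pvIsdigit_toNat b (hdig b (by simp))
    have hc := pvIsdigit_toNat c (hdig c (by simp))
    simp only [pvGroupVal, List.foldl_cons, List.foldl_nil]
    omega
  · simp only [List.length_cons] at hlen; omega

theorem pvGroupVal_zero_iff (g : List Char) (hlen : g.length ≤ 3)
    (hdig : ∀ c ∈ g, PySem.Chars.isdigit c = true) :
    pvGroupVal g = 0 ↔ ∀ c ∈ g, c = '0' := by
  have h0 : ('0' : Char).toNat = 48 := by decide
  rcases g with _ | ⟨a, _ | ⟨b, _ | ⟨c, _ | ⟨d, tl⟩⟩⟩⟩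
  · simp [pvGroupVal]
  · have ha := pvIsdigit_toNat a (hdig a (by simp))
    simp only [pvGroupVal, List.foldl_cons, List.foldl_nil]
    constructor
    · intro h x hx
      rw [List.mem_singleton] at hx; subst hx
      rw [pvChar_eq_iff]; omega
    · intro h
      have h1 := (pvChar_eq_iff _ _).mp (h a (by simp))
      omega
  · have ha := pvIsdigit_toNat a (hdig a (by simp))
    have hb := pvIsdigit_toNat b (hdig b (by simp))
    simp only [pvGroupVal, List.foldl_cons, List.foldl_nil]
    constructor
    · intro h x hx
      rw [List.mem_cons, List.mem_singleton] at hx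
      rw [pvChar_eq_iff]
      rcases hx with rfl | rfl <;> omega
    · intro h
      have h1 := (pvChar_eq_iff _ _).mp (h a (by simp))
      have h2 := (pvChar_eq_iff _ _).mp (h b (by simp))
      omega
  · have ha := pvIsdigit_toNat a (hdig a (by simp))
    have hb := pvIsdigit_toNat b (hdig b (by simp))
    have hc := pvIsdigit_toNat c (hdig c (by simp))
    simp only [pvGroupVal, List.foldl_cons, List.foldl_nil]
    constructor
    · intro h x hx
      rw [List.mem_cons, List.mem_cons, List.mem_singleton] at hx
      rw [pvChar_eq_iff]
      rcases hx with rfl | rfl | rfl <;> omega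
    · intro h
      have h1 := (pvChar_eq_iff _ _).mp (h a (by simp))
      have h2 := (pvChar_eq_iff _ _).mp (h b (by simp))
      have h3 := (pvChar_eq_iff _ _).mp (h c (by simp))
      omega
  · simp only [List.length_cons] at hlen; omega

theorem pvGroupWords_ne (v : Int) (h1 : 1 ≤ v) (h2 : v ≤ 999) : pvGroupWords v ≠ [] := by
  have hvr := PySem.Int.floordiv_mul_add_mod v 100
  have hr0 := PySem.Int.mod_nonneg v (b := 100) (by omega)
  have hr1 := PySem.Int.mod_lt v (b := 100) (by omega)
  simp only [pvGroupWords]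
  by_cases hh : PySem.Int.floordiv v 100 = 0
  · have hrv : PySem.Int.mod v 100 = v := by omega
    rw [if_neg (not_not_intro hh)]
    simp only [List.nil_append]
    by_cases c1 : 10 ≤ PySem.Int.mod v 100 ∧ PySem.Int.mod v 100 < 20
    · rw [if_pos c1]; exact pvTeens_getD_ne _ (by omega) (by omega)
    · rw [if_neg c1]
      by_cases c2 : 0 < PySem.Int.mod v 100 ∧ PySem.Int.mod v 100 < 10
      · rw [if_pos c2]; exact pvDigits_getD_ne _ (by omega) (by omega)
      · rw [if_neg c2, if_pos (show 20 ≤ PySem.Int.mod v 100 by omega)]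
        intro hcontra
        rcases List.append_eq_nil_iff.mp hcontra with ⟨hl, _⟩
        have hq2 : 2 ≤ PySem.Int.floordiv (PySem.Int.mod v 100) 10 := by
          rw [PySem.Int.le_floordiv_iff_mul_le (by omega)]; omega
        have hq9 : PySem.Int.floordiv (PySem.Int.mod v 100) 10 < 10 := by
          rw [PySem.Int.floordiv_lt_iff_lt_mul (by omega)]; omega
        exact pvTens_getD_ne _ (by omega) (by omega) hl
  · have hq1 : 1 ≤ PySem.Int.floordiv v 100 := by
      have h0 : 0 ≤ PySem.Int.floordiv v 100 := by
        rw [PySem.Int.le_floordiv_iff_mul_le (by omega)]; omega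
      omega
    have hq9 : PySem.Int.floordiv v 100 < 10 := by
      rw [PySem.Int.floordiv_lt_iff_lt_mul (by omega)]; omega
    rw [if_pos hh]
    intro hcontra
    rcases List.append_eq_nil_iff.mp hcontra with ⟨hl, _⟩
    rcases List.append_eq_nil_iff.mp hl with ⟨hl2, _⟩
    rcases List.append_eq_nil_iff.mp hl2 with ⟨hl3, _⟩
    exact pvDigits_getD_ne _ (by omega) (by omega) hl3

-- the per-group equivalence: A's character-peeking concat_order computes
-- B's value-based words of the group plus the order suffix
theorem pvConcat_eq (m : Nat) (g : List Char) (hG : pvGood g) :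
    pvConcatOrder (m : Int) g =
      if pvGroupVal g = 0 then [] else pvGroupWords (pvGroupVal g) ++ pvSuffix m := by
  obtain ⟨hne, hlen, hdig, hhead⟩ := hG
  have h0 : ('0' : Char).toNat = 48 := by decide
  have h1t : ('1' : Char).toNat = 49 := by decide
  have hval0 : pvGroupVal g = 0 ↔ ∀ c ∈ g, c = '0' := pvGroupVal_zero_iff g hlen hdig
  have hseteq : (PySem.Set.equal (PySem.Set.ofList g) (PySem.Set.ofList ['0']) = true)
      ↔ pvGroupVal g = 0 := by
    rw [pvSetEqual_zero_iff g hne, hval0]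
  by_cases hv : pvGroupVal g = 0
  · -- all-zero group: A emits nothing and no order suffix
    rw [if_pos hv]
    have hall : ∀ c ∈ g, c = '0' := hval0.mp hv
    have hg3 : g.length = 3 := by
      rcases Nat.lt_or_ge g.length 3 with hlt | hge
      · exfalso
        obtain ⟨x, s', rfl⟩ := List.exists_cons_of_ne_nil hne
        exact (hhead hlt) (by rw [hall x (by simp)]; rfl)
      · omega
    obtain ⟨x, s', rfl⟩ := List.exists_cons_of_ne_nil hne
    rcases s' with _ | ⟨y, _ | ⟨z, _ | ⟨w, tl⟩⟩⟩ <;> simp at hg3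
    have hx := hall x (by simp); have hy := hall y (by simp); have hz := hall z (by simp)
    subst hx; subst hy; subst hz
    simp only [pvConcatOrder]
    norm_num
    decide
  · rw [if_neg hv]
    have hsfx : (if (m : Int) ≠ 0 ∧
        ¬(PySem.Set.equal (PySem.Set.ofList g) (PySem.Set.ofList ['0']) = true)
        then ' ' :: PySem.List.pyGetD pvOrders ((m : Int) - 1) [] else []) = pvSuffix m := by
      rw [pvSuffix]
      by_cases hm : m = 0
      · subst hm; simp
      · rw [if_pos ⟨Int.natCast_ne_zero.mpr hm, by rw [hseteq]; exact hv⟩, if_pos hm]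
    rcases g with _ | ⟨a, _ | ⟨b, _ | ⟨c, _ | ⟨d, tl⟩⟩⟩⟩
    · exact absurd rfl hne
    · -- one digit, leading so non-zero
      have ha := pvIsdigit_toNat a (hdig a (by simp))
      have hv_eq : pvGroupVal [a] = (a.toNat : Int) - 48 := by
        simp [pvGroupVal]
      have hvne : (a.toNat : Int) - 48 ≠ 0 := fun h => hv (by rw [hv_eq]; omega)
      simp only [pvConcatOrder, pvGroupWords, hsfx]
      rw [show PySem.List.pyGetD [a] 0 '0' = a from rfl]
      rw [if_pos (show [a].length = 1 from rfl)]
      rw [show PySem.Int.floordiv (pvGroupVal [a]) 100 = 0 from by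
        rw [PySem.Int.floordiv_eq_iff_of_pos (by norm_num), hv_eq]; omega]
      rw [show PySem.Int.mod (pvGroupVal [a]) 100 = pvGroupVal [a] from by
        have h2 := PySem.Int.floordiv_mul_add_mod (pvGroupVal [a]) 100
        rw [show PySem.Int.floordiv (pvGroupVal [a]) 100 = 0 from by
          rw [PySem.Int.floordiv_eq_iff_of_pos (by norm_num), hv_eq]; omega] at h2
        omega]
      rw [if_neg (show ¬((0 : Int) ≠ 0) from not_not_intro rfl)]
      rw [if_neg (show ¬(10 ≤ pvGroupVal [a] ∧ pvGroupVal [a] < 20) from by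
        rw [hv_eq]; omega)]
      rw [if_pos (show 0 < pvGroupVal [a] ∧ pvGroupVal [a] < 10 from by
        rw [hv_eq]; omega)]
      rw [show pvGroupVal [a] = pvDigitInt a from hv_eq]
      simp
    · -- two digits, leading digit non-zero
      have ha := pvIsdigit_toNat a (hdig a (by simp))
      have hb := pvIsdigit_toNat b (hdig b (by simp))
      have ha0 : a ≠ '0' := by
        have := hhead (by simp)
        simpa using this
      have ha0' : a.toNat ≠ 48 :=
        fun h => ha0 ((pvChar_eq_iff a '0').mpr (by rw [h, h0]))
      have hv_eq : pvGroupVal [a, b] = 10 * ((a.toNat : Int) - 48) + ((b.toNat : Int) - 48) := by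
        simp [pvGroupVal]; try ring
      have hd100 : PySem.Int.floordiv (pvGroupVal [a, b]) 100 = 0 := by
        rw [PySem.Int.floordiv_eq_iff_of_pos (by norm_num), hv_eq]; omega
      have hm100 : PySem.Int.mod (pvGroupVal [a, b]) 100 = pvGroupVal [a, b] := by
        have h2 := PySem.Int.floordiv_mul_add_mod (pvGroupVal [a, b]) 100
        rw [hd100] at h2; omega
      simp only [pvConcatOrder, pvGroupWords, hd100, hm100, hsfx]
      rw [show PySem.List.pyGetD [a, b] (-2) '0' = a from rfl,
        show PySem.List.pyGetD [a, b] (-1) '0' = b from rfl]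
      rw [if_neg (show ¬([a, b].length = 1) from by simp)]
      rw [if_pos (show [a, b].length = 2 ∨ [a, b].length = 3 from Or.inl rfl)]
      rw [if_neg (show ¬([a, b].length = 3 ∧ PySem.List.pyGetD [a, b] 0 '0' ≠ '0') from
        fun h => absurd h.1 (by simp))]
      rw [if_neg (show ¬((0 : Int) ≠ 0) from not_not_intro rfl)]
      simp only [List.nil_append]
      by_cases ha1 : a = '1'
      · subst ha1
        rw [if_pos (show ('1' : Char) = '1' from rfl)]
        rw [if_pos (show 10 ≤ pvGroupVal ['1', b] ∧ pvGroupVal ['1', b] < 20 from by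
          rw [hv_eq, h1t]; omega)]
        rw [show pvGroupVal ['1', b] - 10 = pvDigitInt b from by
          rw [hv_eq, h1t, pvDigitInt]; ring]
      · have ha1' : a.toNat ≠ 49 :=
          fun h => ha1 ((pvChar_eq_iff a '1').mpr (by rw [h, h1t]))
        rw [if_neg ha1]
        rw [if_neg (show ¬(a = '0' ∧ b ≠ '0') from fun h => ha0 h.1)]
        rw [if_pos (show ¬(a = '0' ∨ a = '1') from fun h => h.elim ha0 ha1)]
        rw [if_neg (show ¬(10 ≤ pvGroupVal [a, b] ∧ pvGroupVal [a, b] < 20) from by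
          rw [hv_eq]; omega)]
        rw [if_neg (show ¬(0 < pvGroupVal [a, b] ∧ pvGroupVal [a, b] < 10) from by
          rw [hv_eq]; omega)]
        rw [if_pos (show 20 ≤ pvGroupVal [a, b] from by rw [hv_eq]; omega)]
        have hd10 : PySem.Int.floordiv (pvGroupVal [a, b]) 10 = (a.toNat : Int) - 48 := by
          rw [PySem.Int.floordiv_eq_iff_of_pos (by norm_num), hv_eq]; omega
        have hm10 : PySem.Int.mod (pvGroupVal [a, b]) 10 = (b.toNat : Int) - 48 := by
          have h2 := PySem.Int.floordiv_mul_add_mod (pvGroupVal [a, b]) 10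
          rw [hd10] at h2
          rw [hv_eq] at h2 ⊢; omega
        rw [hd10, hm10]
        rw [show ((a.toNat : Int) - 48) = pvDigitInt a from rfl,
          show ((b.toNat : Int) - 48) = pvDigitInt b from rfl]
        by_cases hb0 : b = '0'
        · subst hb0
          rw [if_neg (show ¬(('0' : Char) ≠ '0') from not_not_intro rfl)]
          rw [if_neg (show ¬(pvDigitInt '0' ≠ 0) from not_not_intro (by
            rw [pvDigitInt, h0]; ring))]
        · have hb0' : b.toNat ≠ 48 :=
            fun h => hb0 ((pvChar_eq_iff b '0').mpr (by rw [h, h0]))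
          rw [if_pos hb0]
          rw [if_pos (show pvDigitInt b ≠ 0 from by rw [pvDigitInt]; omega)]
    · -- three digits
      have ha := pvIsdigit_toNat a (hdig a (by simp))
      have hb := pvIsdigit_toNat b (hdig b (by simp))
      have hc := pvIsdigit_toNat c (hdig c (by simp))
      have hv_eq : pvGroupVal [a, b, c]
          = 100 * ((a.toNat : Int) - 48) + 10 * ((b.toNat : Int) - 48) + ((c.toNat : Int) - 48) := by
        simp [pvGroupVal]; try ring
      have hd100 : PySem.Int.floordiv (pvGroupVal [a, b, c]) 100 = (a.toNat : Int) - 48 := by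
        rw [PySem.Int.floordiv_eq_iff_of_pos (by norm_num), hv_eq]; omega
      have hm100 : PySem.Int.mod (pvGroupVal [a, b, c]) 100
          = 10 * ((b.toNat : Int) - 48) + ((c.toNat : Int) - 48) := by
        have h2 := PySem.Int.floordiv_mul_add_mod (pvGroupVal [a, b, c]) 100
        rw [hd100] at h2
        rw [hv_eq] at h2 ⊢; omega
      simp only [pvConcatOrder, pvGroupWords, hd100, hm100, hsfx]
      rw [show PySem.List.pyGetD [a, b, c] 0 '0' = a from rfl,
        show PySem.List.pyGetD [a, b, c] 1 '0' = b from rfl,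
        show PySem.List.pyGetD [a, b, c] 2 '0' = c from rfl,
        show PySem.List.pyGetD [a, b, c] (-2) '0' = b from rfl,
        show PySem.List.pyGetD [a, b, c] (-1) '0' = c from rfl]
      rw [if_neg (show ¬([a, b, c].length = 1) from by simp)]
      rw [if_pos (show [a, b, c].length = 2 ∨ [a, b, c].length = 3 from Or.inr rfl)]
      -- hundreds part
      have hbz_iff : ((b.toNat : Int) - 48 = 0) ↔ b = '0' := by
        constructor
        · intro h; exact (pvChar_eq_iff b '0').mpr (by omega)
        · intro h; subst h; rw [h0]; ring
      have hcz_iff : ((c.toNat : Int) - 48 = 0) ↔ c = '0' := by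
        constructor
        · intro h; exact (pvChar_eq_iff c '0').mpr (by omega)
        · intro h; subst h; rw [h0]; ring
      have hhun : (if [a, b, c].length = 3 ∧ a ≠ '0' then
            PySem.List.pyGetD pvDigits (pvDigitInt a) [] ++ " hundred".toList
              ++ (if b ≠ '0' ∨ c ≠ '0' then " and ".toList else [])
          else [])
          = (if (a.toNat : Int) - 48 ≠ 0 then
            PySem.List.pyGetD pvDigits ((a.toNat : Int) - 48) [] ++ " hundred".toList
              ++ (if 10 * ((b.toNat : Int) - 48) + ((c.toNat : Int) - 48) ≠ 0
                  then " and ".toList else [])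
          else []) := by
        by_cases haz : a = '0'
        · rw [if_neg (show ¬([a, b, c].length = 3 ∧ a ≠ '0') from fun h => h.2 haz)]
          rw [if_neg (show ¬((a.toNat : Int) - 48 ≠ 0) from not_not_intro (by
            subst haz; rw [h0]; ring))]
        · have haz' : a.toNat ≠ 48 :=
            fun h => haz ((pvChar_eq_iff a '0').mpr (by rw [h, h0]))
          rw [if_pos (show [a, b, c].length = 3 ∧ a ≠ '0' from ⟨rfl, haz⟩)]
          rw [if_pos (show (a.toNat : Int) - 48 ≠ 0 from by omega)]
          rw [show pvDigitInt a = ((a.toNat : Int) - 48) from rfl]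
          congr 1
          by_cases hbz : b = '0'
          · by_cases hcz : c = '0'
            · rw [if_neg (show ¬(b ≠ '0' ∨ c ≠ '0') from by
                push Not; exact ⟨hbz, hcz⟩)]
              rw [if_neg (show ¬(10 * ((b.toNat : Int) - 48) + ((c.toNat : Int) - 48) ≠ 0)
                from not_not_intro (by
                  have e1 := hbz_iff.mpr hbz
                  have e2 := hcz_iff.mpr hcz
                  omega))]
            · rw [if_pos (Or.inr hcz)]
              rw [if_pos (show 10 * ((b.toNat : Int) - 48) + ((c.toNat : Int) - 48) ≠ 0 from by
                have e1 := hbz_iff.mpr hbz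
                have e2 : ¬ ((c.toNat : Int) - 48 = 0) := fun h => hcz (hcz_iff.mp h)
                omega)]
          · rw [if_pos (Or.inl hbz)]
            rw [if_pos (show 10 * ((b.toNat : Int) - 48) + ((c.toNat : Int) - 48) ≠ 0 from by
              have e1 : ¬ ((b.toNat : Int) - 48 = 0) := fun h => hbz (hbz_iff.mp h)
              omega)]
      rw [hhun]
      congr 1
      congr 1
      -- tens/units part on r = 10*Y + Z
      by_cases hb1 : b = '1'
      · subst hb1
        rw [if_pos (show ('1' : Char) = '1' from rfl)]
        rw [if_pos (show 10 ≤ 10 * ((('1' : Char).toNat : Int) - 48) + ((c.toNat : Int) - 48)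
            ∧ 10 * ((('1' : Char).toNat : Int) - 48) + ((c.toNat : Int) - 48) < 20 from by
          rw [h1t]; omega)]
        rw [show 10 * ((('1' : Char).toNat : Int) - 48) + ((c.toNat : Int) - 48) - 10
            = pvDigitInt c from by rw [h1t, pvDigitInt]; ring]
      · have hb1' : b.toNat ≠ 49 :=
          fun h => hb1 ((pvChar_eq_iff b '1').mpr (by rw [h, h1t]))
        rw [if_neg hb1]
        by_cases hbz : b = '0'
        · subst hbz
          by_cases hcz : c = '0'
          · subst hcz
            rw [if_neg (show ¬(('0' : Char) = '0' ∧ ('0' : Char) ≠ '0') from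
              fun h => h.2 rfl)]
            rw [if_neg (show ¬¬(('0' : Char) = '0' ∨ ('0' : Char) = '1') from
              not_not_intro (Or.inl rfl))]
            rw [if_neg (show ¬(10 ≤ 10 * ((('0' : Char).toNat : Int) - 48)
                + ((('0' : Char).toNat : Int) - 48)
              ∧ 10 * ((('0' : Char).toNat : Int) - 48) + ((('0' : Char).toNat : Int) - 48) < 20)
              from by rw [h0]; omega)]
            rw [if_neg (show ¬(0 < 10 * ((('0' : Char).toNat : Int) - 48)
                + ((('0' : Char).toNat : Int) - 48)
              ∧ 10 * ((('0' : Char).toNat : Int) - 48) + ((('0' : Char).toNat : Int) - 48) < 10)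
              from by rw [h0]; omega)]
            rw [if_neg (show ¬(20 ≤ 10 * ((('0' : Char).toNat : Int) - 48)
                + ((('0' : Char).toNat : Int) - 48)) from by rw [h0]; omega)]
          · have hcz' : c.toNat ≠ 48 :=
              fun h => hcz ((pvChar_eq_iff c '0').mpr (by rw [h, h0]))
            rw [if_pos (show ('0' : Char) = '0' ∧ c ≠ '0' from ⟨rfl, hcz⟩)]
            rw [if_neg (show ¬(10 ≤ 10 * ((('0' : Char).toNat : Int) - 48) + ((c.toNat : Int) - 48)
              ∧ 10 * ((('0' : Char).toNat : Int) - 48) + ((c.toNat : Int) - 48) < 20) from by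
              rw [h0]; omega)]
            rw [if_pos (show 0 < 10 * ((('0' : Char).toNat : Int) - 48) + ((c.toNat : Int) - 48)
              ∧ 10 * ((('0' : Char).toNat : Int) - 48) + ((c.toNat : Int) - 48) < 10 from by
              rw [h0]; omega)]
            rw [show 10 * ((('0' : Char).toNat : Int) - 48) + ((c.toNat : Int) - 48)
              = pvDigitInt c from by rw [h0, pvDigitInt]; ring]
        · have hbz' : b.toNat ≠ 48 :=
            fun h => hbz ((pvChar_eq_iff b '0').mpr (by rw [h, h0]))
          rw [if_neg (show ¬(b = '0' ∧ c ≠ '0') from fun h => hbz h.1)]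
          rw [if_pos (show ¬(b = '0' ∨ b = '1') from fun h => h.elim hbz hb1)]
          rw [if_neg (show ¬(10 ≤ 10 * ((b.toNat : Int) - 48) + ((c.toNat : Int) - 48)
            ∧ 10 * ((b.toNat : Int) - 48) + ((c.toNat : Int) - 48) < 20) from by omega)]
          rw [if_neg (show ¬(0 < 10 * ((b.toNat : Int) - 48) + ((c.toNat : Int) - 48)
            ∧ 10 * ((b.toNat : Int) - 48) + ((c.toNat : Int) - 48) < 10) from by omega)]
          rw [if_pos (show 20 ≤ 10 * ((b.toNat : Int) - 48) + ((c.toNat : Int) - 48) from by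
            omega)]
          have hd10 : PySem.Int.floordiv (10 * ((b.toNat : Int) - 48) + ((c.toNat : Int) - 48)) 10
              = (b.toNat : Int) - 48 := by
            rw [PySem.Int.floordiv_eq_iff_of_pos (by norm_num)]; omega
          have hm10 : PySem.Int.mod (10 * ((b.toNat : Int) - 48) + ((c.toNat : Int) - 48)) 10
              = (c.toNat : Int) - 48 := by
            have h2 := PySem.Int.floordiv_mul_add_mod
              (10 * ((b.toNat : Int) - 48) + ((c.toNat : Int) - 48)) 10
            rw [hd10] at h2; omega
          rw [hd10, hm10]
          rw [show ((b.toNat : Int) - 48) = pvDigitInt b from rfl,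
            show ((c.toNat : Int) - 48) = pvDigitInt c from rfl]
          by_cases hcz : c = '0'
          · subst hcz
            rw [if_neg (show ¬(('0' : Char) ≠ '0') from not_not_intro rfl)]
            rw [if_neg (show ¬(pvDigitInt '0' ≠ 0) from not_not_intro (by
              rw [pvDigitInt, h0]; ring))]
          · have hcz' : c.toNat ≠ 48 :=
              fun h => hcz ((pvChar_eq_iff c '0').mpr (by rw [h, h0]))
            rw [if_pos hcz]
            rw [if_pos (show pvDigitInt c ≠ 0 from by rw [pvDigitInt]; omega)]
    · simp only [List.length_cons] at hlen; omega

theorem pvChunks_ne (gs : List (List Char)) (hG : ∀ g ∈ gs, pvGood g) :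
    ∀ x ∈ pvChunks gs, x ≠ [] := by
  induction gs with
  | nil => simp [pvChunks]
  | cons g rest ih =>
    obtain ⟨hne, hlen, hdig, _⟩ := hG g (by simp)
    intro x hx
    simp only [pvChunks] at hx
    rcases List.mem_append.mp hx with hx1 | hx2
    · by_cases hv : pvGroupVal g = 0
      · simp [hv] at hx1
      · rw [if_neg hv, List.mem_singleton] at hx1
        subst hx1
        have hb := pvGroupVal_bounds g hlen hdig
        intro hcontra
        rcases List.append_eq_nil_iff.mp hcontra with ⟨hl, _⟩
        exact pvGroupWords_ne _ (by omega) (by omega) hl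
    · exact ih (fun g' hg' => hG g' (by simp [hg'])) x hx2

theorem pvJoin_eq_nil_iff (sep : List Char) (l : List (List Char)) (h : ∀ x ∈ l, x ≠ []) :
    PySem.Chars.join sep l = [] ↔ l = [] := by
  cases l with
  | nil => simp [PySem.Chars.join_nil]
  | cons x xs =>
    rw [pvJoinFlat]
    simp only [List.append_eq_nil_iff]
    have hx : x ≠ [] := h x (by simp)
    simp [hx]

-- ---------- the two folds compute the joined chunks ----------

theorem pvAfold_eq (gs : List (List Char)) (hG : ∀ g ∈ gs, pvGood g) :
    gs.reverse.zipIdx.foldl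
      (fun rd p =>
        let co := pvConcatOrder (p.2 : Int) p.1
        if co ≠ [] then
          (if (p.2 : Int) ≠ 0 ∧ rd ≠ [] then co ++ ", ".toList ++ rd else co ++ rd)
        else rd) []
    = PySem.Chars.join ", ".toList (pvChunks gs) := by
  induction gs with
  | nil => simp [pvChunks, PySem.Chars.join_nil]
  | cons g rest ih =>
    have hGg := hG g (by simp)
    have hGrest : ∀ g' ∈ rest, pvGood g' := fun g' hg' => hG g' (by simp [hg'])
    obtain ⟨hne, hlen, hdig, hhead⟩ := hGg
    have hb := pvGroupVal_bounds g hlen hdig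
    rw [List.reverse_cons, List.zipIdx_append, List.foldl_append]
    rw [ih hGrest]
    rw [List.zipIdx_cons, List.foldl_cons, List.zipIdx_nil, List.foldl_nil]
    simp only [List.length_reverse, Nat.zero_add]
    rw [pvConcat_eq rest.length g ⟨hne, hlen, hdig, hhead⟩]
    by_cases hv : pvGroupVal g = 0
    · simp [pvChunks, hv]
    · have hco : pvGroupWords (pvGroupVal g) ++ pvSuffix rest.length ≠ [] := by
        intro hcontra
        rcases List.append_eq_nil_iff.mp hcontra with ⟨hl, _⟩
        exact pvGroupWords_ne _ (by omega) (by omega) hl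
      have hchunks : pvChunks (g :: rest)
          = (pvGroupWords (pvGroupVal g) ++ pvSuffix rest.length) :: pvChunks rest := by
        simp [pvChunks, hv]
      rw [hchunks]
      rw [if_neg hv, if_pos hco]
      by_cases hr : rest = []
      · subst hr
        simp [pvChunks, PySem.Chars.join_singleton, PySem.Chars.join_nil]
      · by_cases hrd : PySem.Chars.join ", ".toList (pvChunks rest) = []
        · have hcr : pvChunks rest = [] :=
            (pvJoin_eq_nil_iff _ _ (pvChunks_ne rest hGrest)).mp hrd
          rw [hrd, hcr]
          rw [if_neg (by simp)]
          simp [PySem.Chars.join_singleton]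
        · rw [if_pos ⟨Int.natCast_ne_zero.mpr
              (fun h => hr (List.length_eq_zero_iff.mp h)), hrd⟩]
          have hcr : pvChunks rest ≠ [] :=
            fun hc => hrd (by rw [hc]; exact PySem.Chars.join_nil _)
          obtain ⟨c, cs, hcc⟩ := List.exists_cons_of_ne_nil hcr
          rw [hcc, PySem.Chars.join_cons_cons, ← hcc]

theorem pvSetLast {α : Type} (xs : List α) (x v : α) :
    PySem.List.pySetD (xs ++ [x]) (-1) v = xs ++ [v] := by
  simp [PySem.List.pySetD, PySem.List.pySet?, PySem.List.pyIdx?]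

theorem pvBfold_eq (k : Nat) (gs : List (List Char)) (off : Nat) (acc : List (List Char))
    (hoff : off + gs.length = k) :
    (gs.zipIdx off).foldl
      (fun ch p =>
        let v := pvGroupVal p.1
        if v = 0 then ch
        else
          let w := pvGroupWords v
          let w := if k - 1 - p.2 ≠ 0 then
              w ++ ' ' :: PySem.List.pyGetD pvOrders (((k - 1 - p.2 : Nat) : Int) - 1) []
            else w
          ch ++ [w]) acc
    = acc ++ pvChunks gs := by
  induction gs generalizing off acc with
  | nil => simp [pvChunks]
  | cons g rest ih =>
    rw [List.zipIdx_cons, List.foldl_cons]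
    rw [ih (off + 1) _ (by simp at hoff ⊢; omega)]
    have hK : k - 1 - off = rest.length := by simp at hoff; omega
    by_cases hv : pvGroupVal g = 0
    · simp [pvChunks, hv]
    · simp only [hv, if_neg hv, pvChunks, hK]
      rw [show pvGroupWords (pvGroupVal g) ++ pvSuffix rest.length =
          (if rest.length ≠ 0 then
            pvGroupWords (pvGroupVal g) ++ ' ' :: PySem.List.pyGetD pvOrders ((rest.length : Int) - 1) []
          else pvGroupWords (pvGroupVal g)) from by
        by_cases hm : rest.length = 0 <;> simp [pvSuffix, hm]]
      simp [List.append_assoc]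

-- ---------- grouping: A's reversed split is B's forward split reversed ----------

theorem pvRangeDown (s : List Char) (h q : Nat) (h1 : 1 ≤ h) (h3 : h ≤ 3)
    (hn : s.length = h + 3 * q) :
    PySem.List.pyRange ((s.length : Int)) 0 (-3)
      = (List.range (q+1)).map (fun (k : Nat) => (s.length : Int) + (-3) * k) := by
  simp only [PySem.List.pyRange]
  rw [if_neg (by norm_num), if_neg (by norm_num),
    if_pos (by exact_mod_cast Nat.lt_of_lt_of_le Nat.zero_lt_one (by omega))]
  have e1 : ((s.length : Int) - 0 + - -3 - 1) = ((s.length + 2 : Nat) : Int) := by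
    push_cast; ring
  rw [e1]
  have e2 : (((s.length + 2 : Nat) : Int) / (- -3 : Int)).toNat = (s.length + 2) / 3 := rfl
  rw [e2]
  have e3 : (s.length + 2) / 3 = q + 1 := by omega
  rw [e3]

theorem pvSliceElem (s : List Char) (h q : Nat) (h1 : 1 ≤ h) (h3 : h ≤ 3)
    (hn : s.length = h + 3 * q) (k : Nat) (hk : k < q) :
    PySem.List.slice s (some ((s.length : Int) + (-3) * k - 3)) (some ((s.length : Int) + (-3) * k))
      = (s.drop (h + 3 * (q - 1 - k))).take 3 := by
  have hkb : 3 * k + 3 ≤ s.length := by omega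
  have e1 : (s.length : Int) + (-3) * k - 3 = ((s.length - (3 * k + 3) : Nat) : Int) := by
    omega
  have e2 : (s.length : Int) + (-3) * k = ((s.length - 3 * k : Nat) : Int) := by
    omega
  rw [e1, e2, PySem.List.slice_natCast]
  have e3 : s.length - 3 * k - (s.length - (3 * k + 3)) = 3 := by omega
  have e4 : s.length - (3 * k + 3) = h + 3 * (q - 1 - k) := by omega
  rw [e3, e4]

theorem pvRevMap (s : List Char) (h q : Nat) (h1 : 1 ≤ h) (h3 : h ≤ 3)
    (hn : s.length = h + 3 * q) :
    (List.range q).map (fun (k : Nat) =>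
        PySem.List.slice s (some ((s.length : Int) + (-3) * k - 3)) (some ((s.length : Int) + (-3) * k)))
      = ((List.range q).map (fun (j : Nat) => (s.drop (h + 3 * j)).take 3)).reverse := by
  apply List.ext_getElem
  · simp
  · intro i hi1 hi2
    simp only [List.getElem_map, List.getElem_range, List.getElem_reverse,
      List.length_map, List.length_range]
    have hiq : i < q := by simpa using hi1
    rw [pvSliceElem s h q h1 h3 hn i hiq]

theorem pvOrdersSplit_eq (s : List Char) (h q : Nat) (h1 : 1 ≤ h) (h3 : h ≤ 3)
    (hn : s.length = h + 3 * q) :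
    pvOrdersSplit s = (pvMS s h q).reverse := by
  have hmod : PySem.Int.mod ((s.length : Int)) 3 = ((s.length % 3 : Nat) : Int) :=
    PySem.Int.mod_natCast s.length 3
  simp only [pvOrdersSplit, PySem.List.len_eq, hmod]
  rw [show PySem.List.pyRange ((s.length : Int)) 0 (-3)
      = (List.range (q+1)).map (fun (k : Nat) => (s.length : Int) + (-3) * k) from
    pvRangeDown s h q h1 h3 hn]
  rw [List.map_map]
  simp only [Function.comp_def]
  rw [show List.range (q+1) = List.range q ++ [q] from List.range_succ]
  rw [List.map_append]
  simp only [List.map_cons, List.map_nil, Function.comp]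
  rw [show (List.range q).map (fun (k : Nat) =>
        PySem.List.slice s (some ((s.length : Int) + (-3) * k - 3)) (some ((s.length : Int) + (-3) * k)))
      = ((List.range q).map (fun (j : Nat) => (s.drop (h + 3 * j)).take 3)).reverse from
    pvRevMap s h q h1 h3 hn]
  simp only [pvMS, List.reverse_cons]
  by_cases hc : s.length % 3 = 0
  · have hh3 : h = 3 := by omega
    rw [if_neg (by rw [hc]; simp)]
    congr 1
    -- last element: the slice is s.take h
    have e1 : (s.length : Int) + (-3) * q - 3 = ((0 : Nat) : Int) := by push_cast; omega
    have e2 : (s.length : Int) + (-3) * q = ((3 : Nat) : Int) := by push_cast; omega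
    rw [e1, e2, PySem.List.slice_natCast]
    simp [hh3]
  · rw [if_pos (by exact_mod_cast hc)]
    rw [pvSetLast]
    congr 1
    -- replaced last element: s[:len%3] is s.take h
    rw [PySem.List.slice_to_natCast, show s.length % 3 = h from by omega]

theorem pvBgroups_eq (s : List Char) (h q : Nat) (h1 : 1 ≤ h) (h3 : h ≤ 3)
    (hn : s.length = h + 3 * q) :
    (PySem.List.slice s none (some (if PySem.Int.mod (PySem.List.len s) 3 ≠ 0
        then PySem.Int.mod (PySem.List.len s) 3 else 3)) ::
      (PySem.List.pyRange (if PySem.Int.mod (PySem.List.len s) 3 ≠ 0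
        then PySem.Int.mod (PySem.List.len s) 3 else 3) (PySem.List.len s) 3).map
        (fun i => PySem.List.slice s (some i) (some (i + 3))))
    = pvMS s h q := by
  have hmod : PySem.Int.mod ((PySem.List.len s)) 3 = ((s.length % 3 : Nat) : Int) := by
    rw [PySem.List.len_eq]
    exact_mod_cast PySem.Int.mod_natCast s.length 3
  have hh : (if PySem.Int.mod (PySem.List.len s) 3 ≠ 0
      then PySem.Int.mod (PySem.List.len s) 3 else 3) = ((h : Nat) : Int) := by
    rw [hmod]
    by_cases hc : s.length % 3 = 0
    · rw [hc, if_neg (by simp)]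
      have : h = 3 := by omega
      subst this; norm_num
    · rw [if_pos (by exact_mod_cast hc)]
      exact_mod_cast (by omega : s.length % 3 = h)
  rw [hh]
  have hrange : PySem.List.pyRange ((h : Nat) : Int) (PySem.List.len s) 3
      = (List.range q).map (fun (k : Nat) => ((h : Nat) : Int) + 3 * k) := by
    rw [PySem.List.len_eq]
    simp only [PySem.List.pyRange]
    rw [if_neg (by norm_num), if_pos (by norm_num)]
    by_cases hq : (h : Int) < (s.length : Int)
    · rw [if_pos hq]
      have e1 : ((s.length : Int) - h + 3 - 1) = ((s.length - h + 2 : Nat) : Int) := by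
        omega
      rw [e1]
      have e2 : (((s.length - h + 2 : Nat) : Int) / (3 : Int)).toNat = (s.length - h + 2) / 3 := rfl
      rw [e2]
      have e3 : (s.length - h + 2) / 3 = q := by omega
      rw [e3]
    · rw [if_neg hq]
      have hq0 : q = 0 := by
        have : ¬ h < s.length := by exact_mod_cast hq
        omega
      rw [hq0]
  rw [hrange, List.map_map]
  simp only [pvMS]
  congr 1
  · rw [PySem.List.slice_to_natCast]
  · apply List.map_congr_left
    intro j hj
    simp only [Function.comp_apply]
    have e1 : ((h : Nat) : Int) + 3 * j = ((h + 3 * j : Nat) : Int) := by push_cast; ring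
    have e2 : ((h : Nat) : Int) + 3 * j + 3 = ((h + 3 * j + 3 : Nat) : Int) := by push_cast; ring
    rw [e2, e1, PySem.List.slice_natCast]
    congr 1
    omega

theorem pvMS_good (s : List Char) (h q : Nat) (h1 : 1 ≤ h) (h3 : h ≤ 3)
    (hn : s.length = h + 3 * q) (hdig : ∀ c ∈ s, PySem.Chars.isdigit c = true)
    (hhead : s.head? ≠ some '0') :
    ∀ g ∈ pvMS s h q, pvGood g := by
  intro g hg
  rcases List.mem_cons.mp hg with rfl | hg2
  · refine ⟨?_, ?_, ?_, ?_⟩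
    · have : (s.take h).length = h := by
        rw [List.length_take]; omega
      intro hc; rw [hc] at this; simp at this; omega
    · rw [List.length_take]; omega
    · intro c hc; exact hdig c (List.mem_of_mem_take hc)
    · intro _
      obtain ⟨a, s', rfl⟩ := List.exists_cons_of_ne_nil
        (by intro hc; rw [hc] at hn; simp at hn; omega : s ≠ [])
      obtain ⟨m, rfl⟩ : ∃ m, h = m + 1 := ⟨h - 1, by omega⟩
      simpa using hhead
  · obtain ⟨j, hj, rfl⟩ := List.mem_map.mp hg2
    have hjq : j < q := by simpa using hj
    have hlen : ((s.drop (h + 3 * j)).take 3).length = 3 := by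
      rw [List.length_take, List.length_drop]; omega
    refine ⟨?_, ?_, ?_, ?_⟩
    · intro hc; rw [hc] at hlen; simp at hlen
    · omega
    · intro c hc; exact hdig c (List.mem_of_mem_drop (List.mem_of_mem_take hc))
    · intro hlt; omega

-- ---------- token level ----------

theorem pvLenSplit (s : List Char) (hs : s ≠ []) :
    ∃ h q, 1 ≤ h ∧ h ≤ 3 ∧ s.length = h + 3 * q := by
  have h1 : 1 ≤ s.length := List.length_pos_of_ne_nil hs
  by_cases hm : s.length % 3 = 0
  · exact ⟨3, s.length / 3 - 1, by omega, by omega, by omega⟩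
  · exact ⟨s.length % 3, s.length / 3, by omega, by omega, by omega⟩

theorem pvDropFacts (t : List Char) (hd : PySem.Chars.strIsdigit t = true) :
    (∀ c ∈ t.dropWhile (· == '0'), PySem.Chars.isdigit c = true) ∧
      (t.dropWhile (· == '0')).head? ≠ some '0' := by
  have hall : ∀ c ∈ t, PySem.Chars.isdigit c = true := by
    simp only [PySem.Chars.strIsdigit, Bool.and_eq_true, List.all_eq_true] at hd
    exact fun c hc => hd.2 c hc
  constructor
  · exact fun c hc => hall c ((List.dropWhile_sublist _).subset hc)
  · have := List.head?_dropWhile_not (fun c => c == '0') t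
    cases hcase : (t.dropWhile (fun c => c == '0')).head? with
    | none => simp
    | some x =>
      rw [hcase] at this
      simp only [beq_eq_false_iff_ne] at this
      intro hcontra
      exact this (by injection hcontra)

theorem pvToken_eq (t : List Char) :
    pvTokenWordA t =
      (if PySem.Chars.strIsdigit t then pvNumberWords t
       else (PySem.Dict.get? pvSymb t).getD []) := by
  by_cases hd : PySem.Chars.strIsdigit t = true
  · obtain ⟨hdigs, hheads⟩ := pvDropFacts t hd
    simp only [pvTokenWordA, pvNumberWords, hd, if_true]
    by_cases hsnil : t.dropWhile (· == '0') = []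
    · rw [hsnil]
      decide
    · obtain ⟨h, q, h1, h3, hn⟩ := pvLenSplit _ hsnil
      rw [pvOrdersSplit_eq _ h q h1 h3 hn]
      rw [show (t.dropWhile (· == '0')).isEmpty = false from by
        simp [List.isEmpty_eq_false_iff, hsnil]]
      simp only [Bool.false_eq_true, if_false]
      rw [pvBgroups_eq _ h q h1 h3 hn]
      have hgood := pvMS_good _ h q h1 h3 hn hdigs hheads
      rw [show ((pvMS (t.dropWhile (· == '0')) h q).reverse.isEmpty) = false from by
        simp [pvMS]]
      simp only [Bool.false_eq_true, if_false]
      rw [pvAfold_eq _ hgood]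
      rw [pvBfold_eq (pvMS (t.dropWhile (· == '0')) h q).length _ 0 [] (by simp)]
      rw [List.nil_append]
  · simp [pvTokenWordA, hd]

theorem pvNumberWords_ne (t : List Char) (hd : PySem.Chars.strIsdigit t = true) :
    pvNumberWords t ≠ [] := by
  obtain ⟨hdigs, hheads⟩ := pvDropFacts t hd
  simp only [pvNumberWords]
  by_cases hsnil : t.dropWhile (· == '0') = []
  · rw [show (t.dropWhile (· == '0')).isEmpty = true from by simp [hsnil]]
    rw [if_pos rfl]
    decide
  · obtain ⟨h, q, h1, h3, hn⟩ := pvLenSplit _ hsnil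
    rw [show (t.dropWhile (· == '0')).isEmpty = false from by
      simp [List.isEmpty_eq_false_iff, hsnil]]
    simp only [Bool.false_eq_true, if_false]
    rw [pvBgroups_eq _ h q h1 h3 hn]
    have hgood := pvMS_good _ h q h1 h3 hn hdigs hheads
    rw [pvBfold_eq (pvMS (t.dropWhile (· == '0')) h q).length _ 0 [] (by simp)]
    rw [List.nil_append]
    -- the most significant group has a non-zero value, so the first chunk exists
    have hg0 : pvGood ((t.dropWhile (· == '0')).take h) := hgood _ (by simp [pvMS])
    obtain ⟨hg0ne, hg0len, hg0dig, _⟩ := hg0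
    have hval : pvGroupVal ((t.dropWhile (· == '0')).take h) ≠ 0 := by
      intro hz
      have hall := (pvGroupVal_zero_iff _ hg0len hg0dig).mp hz
      obtain ⟨x, s', hxs⟩ := List.exists_cons_of_ne_nil hsnil
      apply hheads
      rw [hxs]
      have hx0 : x = '0' := by
        apply hall
        rw [hxs]
        obtain ⟨hm, rfl⟩ : ∃ hm, h = hm + 1 := ⟨h - 1, by omega⟩
        simp
      rw [hx0]
      rfl
    have hb := pvGroupVal_bounds _ hg0len hg0dig
    have hchunk : pvChunks (pvMS (t.dropWhile (· == '0')) h q)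
        = (pvGroupWords (pvGroupVal ((t.dropWhile (· == '0')).take h)) ++ pvSuffix
            ((List.range q).map (fun (j : Nat) =>
              ((t.dropWhile (· == '0')).drop (h + 3 * j)).take 3)).length)
          :: pvChunks ((List.range q).map (fun (j : Nat) =>
              ((t.dropWhile (· == '0')).drop (h + 3 * j)).take 3)) := by
      simp [pvMS, pvChunks, hval]
    rw [hchunk, pvJoinFlat]
    intro hcontra
    rcases List.append_eq_nil_iff.mp hcontra with ⟨hl, _⟩
    rcases List.append_eq_nil_iff.mp hl with ⟨hl2, _⟩
    exact pvGroupWords_ne _ (by omega) (by omega) hl2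

theorem pvTokenA_ne (t : List Char)
    (h : PySem.Chars.strIsdigit t = true ∨
      t ∈ ["+".toList, "-".toList, "=".toList, "/".toList, "%".toList,
           "*".toList, "(".toList, ")".toList, "^".toList]) :
    pvTokenWordA t ≠ [] := by
  rcases h with hd | hmem
  · rw [pvToken_eq, if_pos hd]
    exact pvNumberWords_ne t hd
  · fin_cases hmem <;> decide

theorem pvDigitChar_mem (c : Char) (h : PySem.Chars.isdigit c = true) :
    c ∈ "0123456789".toList := by
  have hb := pvIsdigit_toNat c h
  rcases (by omega : c.toNat = 48 ∨ c.toNat = 49 ∨ c.toNat = 50 ∨ c.toNat = 51 ∨ c.toNat = 52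
      ∨ c.toNat = 53 ∨ c.toNat = 54 ∨ c.toNat = 55 ∨ c.toNat = 56 ∨ c.toNat = 57)
    with h|h|h|h|h|h|h|h|h|h
  · have hc : c = '0' := (pvChar_eq_iff c '0').mpr (by rw [h]; decide)
    rw [hc]; decide
  · have hc : c = '1' := (pvChar_eq_iff c '1').mpr (by rw [h]; decide)
    rw [hc]; decide
  · have hc : c = '2' := (pvChar_eq_iff c '2').mpr (by rw [h]; decide)
    rw [hc]; decide
  · have hc : c = '3' := (pvChar_eq_iff c '3').mpr (by rw [h]; decide)
    rw [hc]; decide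
  · have hc : c = '4' := (pvChar_eq_iff c '4').mpr (by rw [h]; decide)
    rw [hc]; decide
  · have hc : c = '5' := (pvChar_eq_iff c '5').mpr (by rw [h]; decide)
    rw [hc]; decide
  · have hc : c = '6' := (pvChar_eq_iff c '6').mpr (by rw [h]; decide)
    rw [hc]; decide
  · have hc : c = '7' := (pvChar_eq_iff c '7').mpr (by rw [h]; decide)
    rw [hc]; decide
  · have hc : c = '8' := (pvChar_eq_iff c '8').mpr (by rw [h]; decide)
    rw [hc]; decide
  · have hc : c = '9' := (pvChar_eq_iff c '9').mpr (by rw [h]; decide)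
    rw [hc]; decide

-- ===== VERDICT (by name: the statement is the Claim_ definition above) =====
theorem math_to_str_spec : Claim_equal_math_to_str := by
  intro expression _ hpre
  unfold Spec_math_to_str
  have halt : math_to_str_alt expression =
      if pvIsValid expression.toList = true then
        String.ofList (PySem.Chars.join [' ']
          ((PySem.Chars.split₀ expression.toList).map (fun t =>
            if PySem.Chars.strIsdigit t then pvNumberWords t
            else (PySem.Dict.get? pvSymb t).getD [])))
      else "invalid input" := rfl
  rw [halt]
  unfold math_to_str
  by_cases hv : pvIsValid expression.toList = true
  · rw [if_pos hv, if_pos hv]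
    · -- both valid: the token loop is the joined word list
      congr 1
      have hne : ∀ t ∈ PySem.Chars.split₀ expression.toList, pvTokenWordA t ≠ [] := by
        simp only [pvIsValid, Bool.and_eq_true, List.all_eq_true] at hv
        obtain ⟨hsub, halltok⟩ := hv
        rcases hpre with h1 | h2 | h3
        · exfalso
          rw [List.all_eq_false] at h1
          obtain ⟨c, hc, hcn⟩ := h1
          rw [PySem.Set.issubset_iff] at hsub
          have hcm := (PySem.Set.mem_ofList _ _).mp
            (hsub c ((PySem.Set.mem_ofList _ _).mpr hc))
          exact hcn (List.contains_iff_mem.mpr hcm)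
        · exfalso
          rw [List.any_eq_true] at h2
          obtain ⟨tk, htk, hb⟩ := h2
          rw [Bool.and_eq_true, Bool.not_eq_true'] at hb
          obtain ⟨hnd, hany⟩ := hb
          rw [List.any_eq_true] at hany
          obtain ⟨c, hc, hcd⟩ := hany
          have := halltok tk htk
          rw [hnd, Bool.false_or, decide_eq_true_eq] at this
          have hcin : c ∈ PySem.Set.inter (PySem.Set.ofList tk)
              (PySem.Set.ofList "0123456789".toList) :=
            (PySem.Set.mem_inter _ _ _).mpr
              ⟨(PySem.Set.mem_ofList _ _).mpr hc,
               (PySem.Set.mem_ofList _ _).mpr (pvDigitChar_mem c hcd)⟩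
          rw [this] at hcin
          simp at hcin
        · intro t ht
          rw [List.all_eq_true] at h3
          have h3t := h3 t ht
          rw [Bool.or_eq_true] at h3t
          rcases h3t with hb | hk
          · exact pvTokenA_ne t (Or.inl (Bool.and_eq_true _ _ |>.mp hb).1)
          · exact pvTokenA_ne t (Or.inr (List.contains_iff_mem.mp hk))
      rw [pvSepJoin pvTokenWordA _ hne]
      congr 1
      exact List.map_congr_left (fun t _ => pvToken_eq t)
  · rw [if_neg hv, if_neg hv]
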